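-- pv_equiv track=rewrite | github.com/Croisssant/farmer_was_replaced | creating_plots.py | n_by_n_plot_alternate
-- ===== SOURCE A (Python) =====
-- def n_by_n_plot_alternate(size, plant_a, plant_b):
-- 	final_output = []
-- 	for i in range(size):
-- 		temp = []
-- 		if i % 2 == 0:
-- 			for j in range(size):
-- 				if j % 2 == 0:
-- 					temp.append(plant_a)
-- 				else:
-- 					temp.append(plant_b)
-- 		else:
-- 			for j in range(size):
-- 				if j % 2 == 0:
-- 					temp.append(plant_b)
-- 				else:
-- 					temp.append(plant_a)
-- 		final_output.append(temp)
-- 	return final_output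
-- ===== SOURCE B (Python) =====
-- def n_by_n_plot_alternate(size, plant_a, plant_b):
--     even_row = [plant_a if j % 2 == 0 else plant_b for j in range(size)]
--     odd_row = [plant_b if j % 2 == 0 else plant_a for j in range(size)]
--     return [list(even_row) if i % 2 == 0 else list(odd_row) for i in range(size)]
-- ===== Notes on version B (the rewrite author's own statement) =====
-- stated objective: alternative
-- what changed: Precomputes the two alternating row templates once and builds the grid in a single comprehension that copies the matching template per row, instead of re-deciding every cell in nested loops.
import Mathlib
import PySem

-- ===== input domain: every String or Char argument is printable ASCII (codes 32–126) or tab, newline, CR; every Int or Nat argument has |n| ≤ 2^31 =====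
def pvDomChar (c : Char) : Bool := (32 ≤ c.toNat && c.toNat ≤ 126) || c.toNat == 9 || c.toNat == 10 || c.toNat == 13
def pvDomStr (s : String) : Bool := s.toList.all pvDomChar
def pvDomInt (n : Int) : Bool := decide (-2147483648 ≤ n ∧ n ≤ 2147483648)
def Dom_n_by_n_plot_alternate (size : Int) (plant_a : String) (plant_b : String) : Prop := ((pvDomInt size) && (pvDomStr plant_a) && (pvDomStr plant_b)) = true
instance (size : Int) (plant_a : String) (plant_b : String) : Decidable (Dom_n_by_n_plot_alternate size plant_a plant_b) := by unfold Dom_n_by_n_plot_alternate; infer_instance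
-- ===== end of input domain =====

-- B precomputes the two alternating row templates once and copies one per row in a single pass, instead of re-deciding every cell in nested loops (alternative decomposition); equivalence proved on all inputs.


-- ===== PORT A =====
-- literal transliteration: outer loop over range(size), inner loop appending cell by cell
def n_by_n_plot_alternate (size : Int) (plant_a : String) (plant_b : String) : List (List String) :=
  (PySem.List.pyRange 0 size 1).foldl (fun final_output i =>
    let temp :=
      if PySem.Int.mod i 2 = 0 then
        (PySem.List.pyRange 0 size 1).foldl (fun temp j =>
          if PySem.Int.mod j 2 = 0 then temp ++ [plant_a] else temp ++ [plant_b]) []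
      else
        (PySem.List.pyRange 0 size 1).foldl (fun temp j =>
          if PySem.Int.mod j 2 = 0 then temp ++ [plant_b] else temp ++ [plant_a]) []
    final_output ++ [temp]) []

-- ===== PORT B =====
-- transliteration of Source B: two template rows built once, one map over i copying the matching template
def n_by_n_plot_alternate_alt (size : Int) (plant_a : String) (plant_b : String) : List (List String) :=
  let even_row := (PySem.List.pyRange 0 size 1).map (fun j =>
    if PySem.Int.mod j 2 = 0 then plant_a else plant_b)
  let odd_row := (PySem.List.pyRange 0 size 1).map (fun j =>
    if PySem.Int.mod j 2 = 0 then plant_b else plant_a)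
  (PySem.List.pyRange 0 size 1).map (fun i =>
    if PySem.Int.mod i 2 = 0 then even_row else odd_row)

-- ===== PRECONDITION & SPEC =====
def Spec_n_by_n_plot_alternate (size : Int) (plant_a : String) (plant_b : String) (out : List (List String)) : Prop := out = n_by_n_plot_alternate_alt size plant_a plant_b
instance (size : Int) (plant_a : String) (plant_b : String) (out : List (List String)) : Decidable (Spec_n_by_n_plot_alternate size plant_a plant_b out) := by unfold Spec_n_by_n_plot_alternate; infer_instance

-- ===== CLAIM (what is proved, stated in full; the proofs are below) =====
def Claim_equal_n_by_n_plot_alternate : Prop := ∀ (size : Int) (plant_a : String) (plant_b : String), Dom_n_by_n_plot_alternate size plant_a plant_b → Spec_n_by_n_plot_alternate size plant_a plant_b (n_by_n_plot_alternate size plant_a plant_b)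

-- ===== LEMMAS AND PROOFS =====
-- append-accumulator fold is a map
theorem pv_foldl_append_map {α β : Type} (l : List α) (f : α → β) (acc : List β) :
    l.foldl (fun acc x => acc ++ [f x]) acc = acc ++ l.map f := by
  induction l generalizing acc with
  | nil => simp
  | cons x xs ih => simp [List.foldl, ih, List.append_assoc]

theorem pv_foldl_append_map_ite {α β : Type} (l : List α) (p : α → Prop) [DecidablePred p] (a b : β) (acc : List β) :
    l.foldl (fun acc x => if p x then acc ++ [a] else acc ++ [b]) acc
      = acc ++ l.map (fun x => if p x then a else b) := by
  induction l generalizing acc with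
  | nil => simp
  | cons x xs ih =>
    simp only [List.foldl, List.map]
    split_ifs <;> simp [ih, List.append_assoc]

-- ===== VERDICT (by name: the statement is the Claim_ definition above) =====
theorem n_by_n_plot_alternate_spec : Claim_equal_n_by_n_plot_alternate := by
  intro size plant_a plant_b _
  unfold Spec_n_by_n_plot_alternate n_by_n_plot_alternate n_by_n_plot_alternate_alt
  simp only [pv_foldl_append_map_ite, pv_foldl_append_map, List.nil_append]
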